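-- pv_equiv track=rewrite | github.com/lemontea123123/programming_roadmap_v1 | Level 6/exercise_d8.py | histogram_min
-- ===== SOURCE A (Python) =====
-- def cari_min(list_param):
--     min_value = None
--
--     for num in list_param:
--         if(min_value == None or min_value > num):
--             min_value = num
--     return min_value
--
-- def histogram_min(dict_param):
--
--     dict_values = dict_param.values()
--
--     nilai_min_values = cari_min(dict_values)
--
--     new_tuple = None
--
--     #list key yg mengandung value tersebut
--     list_key = []
--
--     for key , value in dict_param.items():
--         if(value == nilai_min_values):
--             list_key.append(key)
--
--
--     new_tuple = (nilai_min_values , list_key)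
--     return new_tuple
-- ===== SOURCE B (Python) =====
-- def histogram_min(dict_param):
--     # single pass: carry the running minimum and the keys attaining it
--     min_value = None
--     list_key = []
--     for key, value in dict_param.items():
--         if min_value is None or value < min_value:
--             min_value = value
--             list_key = [key]
--         elif value == min_value:
--             list_key.append(key)
--     return (min_value, list_key)
-- ===== Notes on version B (the rewrite author's own statement) =====
-- stated objective: alternative
-- what changed: replaces A's two separate passes (a find-min helper over the values, then a collect loop over the items) with one pass over the items that maintains the running minimum together with the list of keys attaining it, resetting the list when a smaller value appears
-- outside the precondition, e.g. on histogram_min({}): A returns (None, []), B returns (None, [])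
import Mathlib
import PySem

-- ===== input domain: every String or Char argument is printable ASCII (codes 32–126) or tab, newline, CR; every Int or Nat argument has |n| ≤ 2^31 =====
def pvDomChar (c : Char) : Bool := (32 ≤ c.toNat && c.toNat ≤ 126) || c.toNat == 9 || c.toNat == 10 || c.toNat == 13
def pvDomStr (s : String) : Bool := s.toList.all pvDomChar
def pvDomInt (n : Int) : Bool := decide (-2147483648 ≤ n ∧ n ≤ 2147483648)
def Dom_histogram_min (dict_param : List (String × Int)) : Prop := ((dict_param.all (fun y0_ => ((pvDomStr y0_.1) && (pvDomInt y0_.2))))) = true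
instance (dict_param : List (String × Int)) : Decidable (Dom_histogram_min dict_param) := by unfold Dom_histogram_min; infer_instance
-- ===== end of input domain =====

-- B fuses A's two passes (find-min helper, then collect loop) into ONE pass carrying the
-- running minimum together with the keys attaining it; same O(n) cost, different decomposition.

-- ===== PORT A =====
def cari_min (list_param : List Int) : Option Int :=
  list_param.foldl
    (fun min_value num =>
      match min_value with          -- `min_value == None or min_value > num` (short-circuit or)
      | none => some num
      | some m => if m > num then some num else some m)
    none

def histogram_min (dict_param : List (String × Int)) : Int × List String :=
  let dict_values := dict_param.map Prod.snd
  let nilai_min_values := cari_min dict_values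
  let list_key := dict_param.foldl
    (fun list_key kv => if some kv.2 == nilai_min_values then list_key ++ [kv.1] else list_key) []
  -- on a non-empty dict nilai_min_values is `some _`; the empty dict (where Python returns
  -- (None, [])) lies outside Pre_, the getD 0 is only a typing default there
  (nilai_min_values.getD 0, list_key)

-- ===== PORT B =====
-- the loop body of B: update (running min, keys attaining it) with one item
def altStep (st : Option Int × List String) (kv : String × Int) : Option Int × List String :=
  match st.1 with
  | none => (some kv.2, [kv.1])
  | some m =>
    if kv.2 < m then (some kv.2, [kv.1])
    else if kv.2 = m then (some m, st.2 ++ [kv.1])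
    else st

def histogram_min_alt (dict_param : List (String × Int)) : Int × List String :=
  let st := dict_param.foldl altStep (none, [])
  (st.1.getD 0, st.2)

-- ===== PRECONDITION & SPEC =====
-- Pre_ excludes (i) the empty dict, on which A returns (None, []) — None is not a value of the
-- declared Int type — and (ii) association lists with duplicate keys, which cannot arise from a
-- Python dict (dict construction collapses duplicates), so the assoc-list corner is nobody's.
def Pre_histogram_min (dict_param : List (String × Int)) : Prop :=
  dict_param ≠ [] ∧ (dict_param.map Prod.fst).Nodup
instance (dict_param : List (String × Int)) : Decidable (Pre_histogram_min dict_param) := by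
  unfold Pre_histogram_min; infer_instance

def pvWitness_histogram_min : (List (String × Int)) := [("a", 3), ("b", 1), ("c", 1)]

def Spec_histogram_min (dict_param : List (String × Int)) (out : Int × List String) : Prop := out = histogram_min_alt dict_param
instance (dict_param : List (String × Int)) (out : Int × List String) : Decidable (Spec_histogram_min dict_param out) := by unfold Spec_histogram_min; infer_instance

-- ===== CLAIM (what is proved, stated in full; the proofs are below) =====
def Claim_equal_histogram_min : Prop := ∀ (dict_param : List (String × Int)), Dom_histogram_min dict_param → Pre_histogram_min dict_param → Spec_histogram_min dict_param (histogram_min dict_param)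

-- ===== LEMMAS AND PROOFS =====

-- the one-step function of A's find-min fold
def minStep (mv : Option Int) (num : Int) : Option Int :=
  match mv with
  | none => some num
  | some m => if m > num then some num else some m

lemma cari_min_eq_foldl (v : List Int) : cari_min v = v.foldl minStep none := rfl

lemma foldl_minStep_some : ∀ (v : List Int) (m : Int), ∃ m', v.foldl minStep (some m) = some m' := by
  intro v
  induction v with
  | nil => exact fun m => ⟨m, rfl⟩
  | cons a t ih =>
    intro m
    simp only [List.foldl_cons, minStep]
    split_ifs <;> exact ih _

lemma cari_min_none_iff (v : List Int) : cari_min v = none ↔ v = [] := by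
  cases v with
  | nil => simp [cari_min]
  | cons a t =>
    simp only [cari_min, List.foldl_cons]
    obtain ⟨m', hm'⟩ := foldl_minStep_some t a
    show List.foldl minStep (some a) t = none ↔ _
    simp [hm']

-- the computed minimum is ≤ every element of the list and ≤ the accumulator
lemma foldl_minStep_le : ∀ (v : List Int) (acc : Option Int) (m : Int),
    v.foldl minStep acc = some m →
    (∀ a ∈ v, m ≤ a) ∧ (∀ m0, acc = some m0 → m ≤ m0) := by
  intro v
  induction v with
  | nil => intro acc m h; simp_all
  | cons a t ih =>
    intro acc m h
    simp only [List.foldl_cons] at h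
    obtain ⟨h1, h2⟩ := ih (minStep acc a) m h
    constructor
    · intro b hb
      rcases List.mem_cons.mp hb with rfl | hb
      · cases acc with
        | none => exact h2 b rfl
        | some m0 =>
          simp only [minStep] at h2
          split_ifs at h2 with hlt
          · exact h2 b rfl
          · exact le_trans (h2 m0 rfl) (by omega)
      · exact h1 b hb
    · intro m0 hm0
      subst hm0
      simp only [minStep] at h2
      split_ifs at h2 with hlt
      · exact le_trans (h2 a rfl) (by omega)
      · exact h2 m0 rfl

-- invariant: B's fold state is (A's min of the prefix, keys of the prefix attaining it)
lemma alt_fold_eq (l : List (String × Int)) :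
    l.foldl altStep (none, []) =
      (cari_min (l.map Prod.snd),
       (l.filter (fun kv => some kv.2 == cari_min (l.map Prod.snd))).map Prod.fst) := by
  induction l using List.reverseRecOn with
  | nil => simp [cari_min]
  | append_singleton l x ih =>
    obtain ⟨xk, xv⟩ := x
    rw [List.foldl_append, ih]
    have hmap : (l ++ [(xk, xv)]).map Prod.snd = l.map Prod.snd ++ [xv] := by simp
    have hmin : cari_min (l.map Prod.snd ++ [xv])
        = minStep (cari_min (l.map Prod.snd)) xv := by
      simp [cari_min_eq_foldl, List.foldl_append]
    cases hM : cari_min (l.map Prod.snd) with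
    | none =>
      have hl : l = [] := by
        have := (cari_min_none_iff (l.map Prod.snd)).mp hM
        simpa using this
      subst hl
      simp [altStep, cari_min]
    | some m =>
      rw [hM] at hmin
      simp only [minStep] at hmin
      by_cases hlt : xv < m
      · -- new strict minimum: the list of keys resets
        have hmin' : cari_min (l.map Prod.snd ++ [xv]) = some xv := by
          rw [hmin]; simp [show m > xv by omega]
        simp [altStep, hlt, hmap, hmin', List.filter_append]
        intro a b hab
        have hle := (foldl_minStep_le (l.map Prod.snd) none m
          (by rw [← cari_min_eq_foldl]; exact hM)).1 b
          (List.mem_map_of_mem (f := Prod.snd) hab)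
        omega
      · by_cases heq : xv = m
        · -- ties the minimum: the key is appended
          subst heq
          have hmin' : cari_min (l.map Prod.snd ++ [xv]) = some xv := by
            rw [hmin]; simp
          simp [altStep, hlt, hmap, hmin', List.filter_append]
        · -- strictly larger: state unchanged, x filtered out
          have hmin' : cari_min (l.map Prod.snd ++ [xv]) = some m := by
            rw [hmin]; simp [show ¬ m > xv by omega]
          simp [altStep, hM, hlt, heq, hmap, hmin', List.filter_append]

lemma ports_eq (l : List (String × Int)) : histogram_min l = histogram_min_alt l := by
  simp only [histogram_min, histogram_min_alt, alt_fold_eq,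
    PySem.List.foldl_append_if (fun kv => some kv.2 == cari_min (l.map Prod.snd)) Prod.fst]
  simp

-- ===== VERDICT (by name: the statement is the Claim_ definition above) =====
theorem histogram_min_spec : Claim_equal_histogram_min := by
  intro l _ _
  exact ports_eq l
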